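-- pv_equiv track=rewrite | github.com/jeff-brown/forgotten-depths | src/server/utils/parser.py | parse_target
-- ===== SOURCE A (Python) =====
-- from typing import List, Tuple, Dict, Any
--
-- def parse_target(target_text: str, available_targets: List[str]) -> str:
--     """Parse target text and find best match from available targets."""
--     if not target_text or not available_targets:
--         return None
--
--     target_text = target_text.lower()
--
--     for target in available_targets:
--         if target.lower() == target_text:
--             return target
--
--     for target in available_targets:
--         if target.lower().startswith(target_text):
--             return target
--
--     for target in available_targets:
--         if target_text in target.lower():
--             return target
--
--     return None
-- ===== SOURCE B (Python) =====
-- def parse_target(target_text, available_targets):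
--     """Parse target text and find best match from available targets."""
--     if not target_text or not available_targets:
--         return None
--     t = target_text.lower()
--     prefix_match = None
--     substr_match = None
--     for target in available_targets:
--         low = target.lower()
--         if low == t:
--             return target
--         if prefix_match is None and low.startswith(t):
--             prefix_match = target
--         if substr_match is None and t in low:
--             substr_match = target
--     return prefix_match if prefix_match is not None else substr_match
-- ===== Notes on version B (the rewrite author's own statement) =====
-- stated objective: alternative
-- what changed: Replaces A's three sequential scans of available_targets with a single pass that lowercases each target once, returns immediately on an exact match, and records set-once first prefix and first substring candidates resolved after the loop.
import Mathlib
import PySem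

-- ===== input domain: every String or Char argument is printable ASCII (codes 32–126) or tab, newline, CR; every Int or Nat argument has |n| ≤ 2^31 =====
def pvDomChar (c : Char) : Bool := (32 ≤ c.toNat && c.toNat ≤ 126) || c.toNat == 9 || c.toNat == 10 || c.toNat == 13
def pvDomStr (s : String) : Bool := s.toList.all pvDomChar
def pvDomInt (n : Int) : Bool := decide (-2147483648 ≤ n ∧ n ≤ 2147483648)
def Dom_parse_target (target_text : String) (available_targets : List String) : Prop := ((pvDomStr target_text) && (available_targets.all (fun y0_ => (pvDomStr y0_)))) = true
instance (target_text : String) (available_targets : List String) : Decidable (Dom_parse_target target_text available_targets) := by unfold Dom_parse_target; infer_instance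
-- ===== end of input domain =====

-- B replaces A's three sequential scans with one pass that lowercases each target once,
-- returns on the first exact match, and records set-once first prefix/substring candidates.

-- ===== PORT A =====
-- first loop: exact lowercase match
def pvScanExact (t : String) : List String → Option String
  | [] => none
  | x :: xs => if PySem.Str.lower x = t then some x else pvScanExact t xs

-- second loop: lowercase-prefix match
def pvScanPrefix (t : String) : List String → Option String
  | [] => none
  | x :: xs => if PySem.Str.startswith (PySem.Str.lower x) t then some x else pvScanPrefix t xs

-- third loop: lowercase-substring match
def pvScanSub (t : String) : List String → Option String
  | [] => none
  | x :: xs => if PySem.Str.isIn t (PySem.Str.lower x) then some x else pvScanSub t xs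

def parse_target (target_text : String) (available_targets : List String) : Option String :=
  if target_text = "" ∨ available_targets = [] then none
  else
    let t := PySem.Str.lower target_text
    match pvScanExact t available_targets with
    | some r => some r
    | none =>
      match pvScanPrefix t available_targets with
      | some r => some r
      | none =>
        match pvScanSub t available_targets with
        | some r => some r
        | none => none

-- ===== PORT B =====
-- single pass; pref/sub are set-once accumulators, exact match returns immediately
def pvScanOnce (t : String) (pref sub : Option String) : List String → Option String
  | [] => match pref with
          | some p => some p
          | none => sub
  | x :: xs =>
    let low := PySem.Str.lower x
    if low = t then some x
    else
      let pref' := if pref = none ∧ PySem.Str.startswith low t then some x else pref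
      let sub'  := if sub = none ∧ PySem.Str.isIn t low then some x else sub
      pvScanOnce t pref' sub' xs

def parse_target_alt (target_text : String) (available_targets : List String) : Option String :=
  if target_text = "" ∨ available_targets = [] then none
  else pvScanOnce (PySem.Str.lower target_text) none none available_targets

-- ===== PRECONDITION & SPEC =====
def Spec_parse_target (target_text : String) (available_targets : List String) (out : Option String) : Prop := out = parse_target_alt target_text available_targets
instance (target_text : String) (available_targets : List String) (out : Option String) : Decidable (Spec_parse_target target_text available_targets out) := by unfold Spec_parse_target; infer_instance

-- ===== CLAIM (what is proved, stated in full; the proofs are below) =====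
def Claim_equal_parse_target : Prop := ∀ (target_text : String) (available_targets : List String), Dom_parse_target target_text available_targets → Spec_parse_target target_text available_targets (parse_target target_text available_targets)

-- ===== LEMMAS AND PROOFS =====

-- invariant of B's single pass: it resolves the three tiers in A's priority order,
-- with the accumulators taking precedence within their own tier
theorem pvScanOnce_eq (t : String) (pref sub : Option String) (xs : List String) :
    pvScanOnce t pref sub xs =
      match pvScanExact t xs with
      | some r => some r
      | none =>
        match (match pref with | some p => some p | none => pvScanPrefix t xs) with
        | some r => some r
        | none => match sub with | some s => some s | none => pvScanSub t xs := by
  induction xs generalizing pref sub with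
  | nil => cases pref <;> cases sub <;> simp [pvScanOnce, pvScanExact, pvScanPrefix, pvScanSub]
  | cons x xs ih =>
    by_cases hx : PySem.Str.lower x = t
    · simp [pvScanOnce, pvScanExact, hx]
    · simp only [pvScanOnce, pvScanExact, pvScanPrefix, pvScanSub, hx, if_false, ih]
      cases pref <;> cases sub <;> split_ifs <;>
        cases hE : pvScanExact t xs <;> simp_all

-- ===== VERDICT (by name: the statement is the Claim_ definition above) =====
theorem parse_target_spec : Claim_equal_parse_target := by
  intro t av _
  unfold Spec_parse_target parse_target parse_target_alt
  by_cases h : t = "" ∨ av = []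
  · simp [h]
  · simp only [h, if_false]
    rw [pvScanOnce_eq]
    cases pvScanExact (PySem.Str.lower t) av <;>
      cases pvScanPrefix (PySem.Str.lower t) av <;>
      cases pvScanSub (PySem.Str.lower t) av <;> simp
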